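-- pv_equiv track=rewrite | github.com/jiminkyung/Algorithm | Backjoon/1941_소문난 칠공주.py | bfs
-- ===== SOURCE A (Python) =====
-- from collections import deque
--
-- dx = [-1, 1, 0, 0]
--
-- dy = [0, 0, -1, 1]
--
-- def bfs(team):
--     """
--     team의 첫번째 학생을 큐와 seen(set)에 추가한다.
--     첫번째 학생으로부터 bfs를 진행하며 조건을 체크한다.
--     조건은 1) 방문하지 않은 좌표일것(seen으로 체크), 2) team에 존재하는 좌표일것
--     두 조건을 만족한다면 seen, 큐에 해당 좌표를 추가하고 카운트한다.
--     최종 카운트가 7이라면 True, 아니라면 False를 반환하게 된다.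
--     """
--     queue = deque([team[0]])
--     seen = {team[0]}  # set()
--     cnt = 1
--
--     while queue:
--         x, y = queue.popleft()
--         for i in range(4):
--             nx = x + dx[i]
--             ny = y + dy[i]
--             if (nx, ny) in team and (nx, ny) not in seen:
--                 seen.add((nx, ny))
--                 queue.append((nx, ny))
--                 cnt += 1
--     return cnt == 7
-- ===== SOURCE B (Python) =====
-- def bfs(team):
--     # Saturation / fixpoint computation of the connected component of team[0],
--     # instead of an explicit BFS queue.
--     start = team[0]
--     cells = []
--     for c in team:
--         if c not in cells:
--             cells.append(c)
--     comp = {start}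
--     for _ in range(len(cells)):
--         for (x, y) in cells:
--             if (x, y) not in comp and ((x - 1, y) in comp or (x + 1, y) in comp
--                                        or (x, y - 1) in comp or (x, y + 1) in comp):
--                 comp.add((x, y))
--     return len(comp) == 7
-- ===== Notes on version B (the rewrite author's own statement) =====
-- stated objective: alternative
-- what changed: Replaces the queue-based BFS with a saturation/fixpoint computation: the team is deduped once, then the component of team[0] is grown by repeated full passes that add any cell with a 4-neighbor already in the component, until (after len(cells) passes) a fixpoint is guaranteed; the answer is whether the component has 7 distinct cells.
import Mathlib
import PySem

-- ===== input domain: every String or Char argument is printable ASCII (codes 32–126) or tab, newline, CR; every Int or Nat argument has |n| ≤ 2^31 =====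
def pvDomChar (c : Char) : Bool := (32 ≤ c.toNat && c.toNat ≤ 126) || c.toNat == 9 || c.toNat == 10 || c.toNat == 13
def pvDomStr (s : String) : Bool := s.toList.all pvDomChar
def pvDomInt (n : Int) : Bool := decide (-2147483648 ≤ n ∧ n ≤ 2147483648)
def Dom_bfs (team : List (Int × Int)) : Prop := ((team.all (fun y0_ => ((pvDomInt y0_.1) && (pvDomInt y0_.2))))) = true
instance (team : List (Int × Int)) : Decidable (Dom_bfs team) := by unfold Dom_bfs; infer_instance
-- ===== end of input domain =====

-- B replaces the BFS queue by repeated saturation passes over the deduped team until a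
-- fixpoint is reached (alternative algorithm, not claimed faster); both raise on an empty team.

-- ===== PORT A =====
def dxL : List Int := [-1, 1, 0, 0]
def dyL : List Int := [0, 0, -1, 1]

-- inner 'for i in range(4)' loop body of A, acting on the state (queue, seen, cnt)
def bfsInner (team : List (Int × Int)) (x y : Int)
    (st : List (Int × Int) × PySem.Set (Int × Int) × Int) :
    List (Int × Int) × PySem.Set (Int × Int) × Int :=
  (List.range 4).foldl (fun st i =>
    let nx := x + (PySem.List.pyGet? dxL (i : Int)).getD 0  -- i < 4: always in range, .getD only totalizes
    let ny := y + (PySem.List.pyGet? dyL (i : Int)).getD 0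
    if (nx, ny) ∈ team ∧ (nx, ny) ∉ st.2.1 then
      (st.1 ++ [(nx, ny)], PySem.Set.add st.2.1 (nx, ny), st.2.2 + 1)
    else st) st

-- the 'while queue:' loop; fuel only totalizes (2*len(team)+1 always suffices, proved below)
def bfsLoop (team : List (Int × Int)) :
    Nat → List (Int × Int) → PySem.Set (Int × Int) → Int → PySem.Set (Int × Int) × Int
  | 0, _, seen, cnt => (seen, cnt)
  | _ + 1, [], seen, cnt => (seen, cnt)
  | fuel + 1, (x, y) :: rest, seen, cnt =>
      let st := bfsInner team x y (rest, seen, cnt)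
      bfsLoop team fuel st.1 st.2.1 st.2.2

def bfs (team : List (Int × Int)) : Bool :=
  match team with
  | [] => false  -- team[0] raises IndexError in Python; excluded by Pre_bfs
  | t0 :: _ =>
    let r := bfsLoop team (2 * team.length + 1) [t0] (PySem.Set.ofList [t0]) 1
    decide (r.2 = 7)

-- ===== PORT B =====
-- one full pass of B's inner 'for (x, y) in cells' loop
def satPass (cells : List (Int × Int)) (comp : PySem.Set (Int × Int)) : PySem.Set (Int × Int) :=
  cells.foldl (fun comp c =>
    if c ∉ comp ∧ ((c.1 - 1, c.2) ∈ comp ∨ (c.1 + 1, c.2) ∈ comp ∨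
                   (c.1, c.2 - 1) ∈ comp ∨ (c.1, c.2 + 1) ∈ comp)
    then PySem.Set.add comp c else comp) comp

def bfs_alt (team : List (Int × Int)) : Bool :=
  match team with
  | [] => false  -- team[0] raises IndexError in Python; excluded by Pre_bfs
  | start :: _ =>
    let cells := PySem.Set.ofList team  -- B's dedupe loop = first-occurrence dedup
    let comp := (List.range cells.length).foldl (fun comp _ => satPass cells comp)
      (PySem.Set.ofList [start])
    decide (comp.length = 7)

-- ===== PRECONDITION & SPEC =====
-- Pre_ excludes exactly the empty list, on which A's team[0] raises IndexError.
def Pre_bfs (team : List (Int × Int)) : Prop := team ≠ []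
instance (team : List (Int × Int)) : Decidable (Pre_bfs team) := by unfold Pre_bfs; infer_instance
def pvWitness_bfs : (List (Int × Int)) := [(0, 0), (0, 1)]

def Spec_bfs (team : List (Int × Int)) (out : Bool) : Prop := out = bfs_alt team
instance (team : List (Int × Int)) (out : Bool) : Decidable (Spec_bfs team out) := by unfold Spec_bfs; infer_instance

-- ===== CLAIM (what is proved, stated in full; the proofs are below) =====
def Claim_equal_bfs : Prop := ∀ (team : List (Int × Int)), Dom_bfs team → Pre_bfs team → Spec_bfs team (bfs team)

-- ===== LEMMAS AND PROOFS =====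

-- 4-neighbour adjacency used by both programs
def Adj (p q : Int × Int) : Prop :=
  q = (p.1 - 1, p.2) ∨ q = (p.1 + 1, p.2) ∨ q = (p.1, p.2 - 1) ∨ q = (p.1, p.2 + 1)

theorem adj_symm {p q : Int × Int} (h : Adj p q) : Adj q p := by
  obtain ⟨a, b⟩ := p; obtain ⟨c, d⟩ := q
  simp only [Adj, Prod.mk.injEq] at h ⊢
  omega

-- cells reachable from s through 4-adjacency inside team
inductive Reach (team : List (Int × Int)) (s : Int × Int) : Int × Int → Prop
  | refl : Reach team s s
  | step {p q} : Reach team s p → Adj p q → q ∈ team → Reach team s q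

theorem reach_subset_of_closed {team : List (Int × Int)} {t0 : Int × Int}
    {S : List (Int × Int)} (h0 : t0 ∈ S)
    (hcl : ∀ e ∈ S, ∀ d, Adj e d → d ∈ team → d ∈ S) :
    ∀ c, Reach team t0 c → c ∈ S := by
  intro c h
  induction h with
  | refl => exact h0
  | step hp hadj hmem ih => exact hcl _ ih _ hadj hmem

-- ---------- A side ----------

def tryAdd (team : List (Int × Int)) (c : Int × Int)
    (st : List (Int × Int) × PySem.Set (Int × Int) × Int) :
    List (Int × Int) × PySem.Set (Int × Int) × Int :=
  if c ∈ team ∧ c ∉ st.2.1 then (st.1 ++ [c], PySem.Set.add st.2.1 c, st.2.2 + 1) else st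

theorem bfsInner_eq (team : List (Int × Int)) (x y : Int) (st : List (Int × Int) × PySem.Set (Int × Int) × Int) :
    bfsInner team x y st =
      tryAdd team (x, y + 1) (tryAdd team (x, y - 1)
        (tryAdd team (x + 1, y) (tryAdd team (x - 1, y) st))) := by
  have h4 : List.range 4 = [0, 1, 2, 3] := by decide
  unfold bfsInner
  rw [h4]
  have h2 : Int.toNat 2 = 2 := rfl
  have h3 : Int.toNat 3 = 3 := rfl
  norm_num [tryAdd, PySem.List.pyGet?, PySem.List.pyIdx?, dxL, dyL, h2, h3, sub_eq_add_neg]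

-- the loop invariant for A's BFS
def InvT (team : List (Int × Int)) (t0 : Int × Int)
    (q : List (Int × Int)) (s : PySem.Set (Int × Int)) (n : Int) : Prop :=
  (∀ c ∈ q, c ∈ s) ∧ s.Nodup ∧ t0 ∈ s ∧ (∀ c ∈ s, Reach team t0 c) ∧ n = (s.length : Int)

-- number of not-yet-seen distinct team cells (core of the termination measure)
def U (team : List (Int × Int)) (s : PySem.Set (Int × Int)) : Nat :=
  ((PySem.Set.ofList team).filter (fun c => decide (c ∉ s))).length

theorem length_filter_ne {α : Type} [DecidableEq α] {m : List α} (hm : m.Nodup) {c : α}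
    (hc : c ∈ m) : (m.filter (fun x => decide (x ≠ c))).length + 1 = m.length := by
  induction m with
  | nil => cases hc
  | cons a t ih =>
    obtain ⟨hat, hnt⟩ := List.nodup_cons.mp hm
    rcases List.mem_cons.mp hc with rfl | hct
    · have hfa : t.filter (fun x => decide (x ≠ c)) = t :=
        List.filter_eq_self.mpr (fun x hx => by
          simp only [ne_eq, decide_eq_true_eq]
          rintro rfl; exact hat hx)
      rw [List.filter_cons, if_neg (by simp), hfa]
      simp
    · have hih := ih hnt hct
      have hac : a ≠ c := fun h => hat (h ▸ hct)
      rw [List.filter_cons, if_pos (by simp [hac]), List.length_cons, List.length_cons]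
      omega

theorem U_add_succ_le {team : List (Int × Int)} {s : PySem.Set (Int × Int)} {c : Int × Int}
    (hct : c ∈ team) (hcs : c ∉ s) : U team (PySem.Set.add s c) + 1 ≤ U team s := by
  classical
  unfold U
  have hcells : (PySem.Set.ofList team).Nodup := PySem.Set.nodup_ofList team
  have hcmem : c ∈ PySem.Set.ofList team := (PySem.Set.mem_ofList _ _).mpr hct
  have hco : ((PySem.Set.ofList team).filter (fun x => decide (x ∉ PySem.Set.add s c)))
      = ((PySem.Set.ofList team).filter (fun x => decide (x ∉ s))).filter (fun x => decide (x ≠ c)) := by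
    rw [List.filter_filter]
    apply List.filter_congr
    intro x _
    simp [PySem.Set.mem_add, not_or, and_comm]
  rw [hco]
  have hm : ((PySem.Set.ofList team).filter (fun x => decide (x ∉ s))).Nodup :=
    hcells.filter _
  have hcm : c ∈ (PySem.Set.ofList team).filter (fun x => decide (x ∉ s)) :=
    List.mem_filter.mpr ⟨hcmem, by simpa using hcs⟩
  have := length_filter_ne hm hcm
  omega

theorem U_le (team : List (Int × Int)) (s : PySem.Set (Int × Int)) :
    U team s ≤ team.length :=
  le_trans (List.length_filter_le _ _) (PySem.Set.length_ofList_le team)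

theorem tryAdd_spec (team : List (Int × Int)) (t0 c : Int × Int)
    (st : List (Int × Int) × PySem.Set (Int × Int) × Int)
    (hInv : InvT team t0 st.1 st.2.1 st.2.2) (hreach : c ∈ team → Reach team t0 c) :
    InvT team t0 (tryAdd team c st).1 (tryAdd team c st).2.1 (tryAdd team c st).2.2 ∧
    (∀ e ∈ st.2.1, e ∈ (tryAdd team c st).2.1) ∧
    (∀ e ∈ (tryAdd team c st).2.1, e ∈ st.2.1 ∨ e ∈ (tryAdd team c st).1) ∧
    (∀ e ∈ st.1, e ∈ (tryAdd team c st).1) ∧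
    (c ∈ team → c ∈ (tryAdd team c st).2.1) ∧
    2 * U team (tryAdd team c st).2.1 + (tryAdd team c st).1.length ≤
      2 * U team st.2.1 + st.1.length := by
  obtain ⟨q, s, n⟩ := st
  obtain ⟨hq, hnd, ht0, hr, hn⟩ := hInv
  unfold tryAdd
  by_cases h : c ∈ team ∧ c ∉ s
  · obtain ⟨hct, hcs⟩ := h
    simp only [if_pos (⟨hct, hcs⟩ : c ∈ team ∧ c ∉ s)]
    have hadd : PySem.Set.add s c = s ++ [c] := PySem.Set.add_of_not_mem hcs
    have hmem : ∀ e, e ∈ PySem.Set.add s c ↔ e ∈ s ∨ e = c := fun e => PySem.Set.mem_add _ _ _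
    refine ⟨⟨?_, ?_, ?_, ?_, ?_⟩, ?_, ?_, ?_, ?_, ?_⟩
    · intro e he
      rcases List.mem_append.mp he with he | he
      · exact (hmem e).mpr (Or.inl (hq e he))
      · exact (hmem e).mpr (Or.inr (List.mem_singleton.mp he))
    · exact PySem.Set.nodup_add _ _ hnd
    · exact (hmem t0).mpr (Or.inl ht0)
    · intro e he
      rcases (hmem e).mp he with he | rfl
      · exact hr e he
      · exact hreach hct
    · rw [hadd]; simp at hn ⊢; omega
    · intro e he; exact (hmem e).mpr (Or.inl he)
    · intro e he
      rcases (hmem e).mp he with he | rfl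
      · exact Or.inl he
      · exact Or.inr (by simp)
    · intro e he; simp [he]
    · intro _; exact (hmem c).mpr (Or.inr rfl)
    · have := U_add_succ_le hct hcs
      simp only [List.length_append, List.length_cons, List.length_nil]
      omega
  · simp only [if_neg h]
    refine ⟨⟨hq, hnd, ht0, hr, hn⟩, fun e he => he, fun e he => Or.inl he, fun e he => he, ?_,
      le_refl _⟩
    intro hct
    by_contra hcs
    exact h ⟨hct, hcs⟩

theorem bfsInner_spec (team : List (Int × Int)) (t0 : Int × Int) (x y : Int)
    (rest : List (Int × Int)) (s : PySem.Set (Int × Int)) (n : Int)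
    (hInv : InvT team t0 rest s n) (hxy : Reach team t0 (x, y)) :
    InvT team t0 (bfsInner team x y (rest, s, n)).1 (bfsInner team x y (rest, s, n)).2.1
      (bfsInner team x y (rest, s, n)).2.2 ∧
    (∀ e ∈ s, e ∈ (bfsInner team x y (rest, s, n)).2.1) ∧
    (∀ e ∈ (bfsInner team x y (rest, s, n)).2.1, e ∈ s ∨ e ∈ (bfsInner team x y (rest, s, n)).1) ∧
    (∀ e ∈ rest, e ∈ (bfsInner team x y (rest, s, n)).1) ∧
    (∀ d, Adj (x, y) d → d ∈ team → d ∈ (bfsInner team x y (rest, s, n)).2.1) ∧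
    2 * U team (bfsInner team x y (rest, s, n)).2.1 + (bfsInner team x y (rest, s, n)).1.length ≤
      2 * U team s + rest.length := by
  rw [bfsInner_eq]
  have hr1 : (x - 1, y) ∈ team → Reach team t0 (x - 1, y) := fun h =>
    Reach.step hxy (Or.inl rfl) h
  have hr2 : (x + 1, y) ∈ team → Reach team t0 (x + 1, y) := fun h =>
    Reach.step hxy (Or.inr (Or.inl rfl)) h
  have hr3 : (x, y - 1) ∈ team → Reach team t0 (x, y - 1) := fun h =>
    Reach.step hxy (Or.inr (Or.inr (Or.inl rfl))) h
  have hr4 : (x, y + 1) ∈ team → Reach team t0 (x, y + 1) := fun h =>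
    Reach.step hxy (Or.inr (Or.inr (Or.inr rfl))) h
  obtain ⟨hI1, hm1, hc1, hqm1, hin1, hu1⟩ := tryAdd_spec team t0 (x - 1, y) (rest, s, n) hInv hr1
  obtain ⟨hI2, hm2, hc2, hqm2, hin2, hu2⟩ :=
    tryAdd_spec team t0 (x + 1, y) (tryAdd team (x - 1, y) (rest, s, n)) hI1 hr2
  obtain ⟨hI3, hm3, hc3, hqm3, hin3, hu3⟩ :=
    tryAdd_spec team t0 (x, y - 1)
      (tryAdd team (x + 1, y) (tryAdd team (x - 1, y) (rest, s, n))) hI2 hr3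
  obtain ⟨hI4, hm4, hc4, hqm4, hin4, hu4⟩ :=
    tryAdd_spec team t0 (x, y + 1)
      (tryAdd team (x, y - 1)
        (tryAdd team (x + 1, y) (tryAdd team (x - 1, y) (rest, s, n)))) hI3 hr4
  have hu1' : 2 * U team (tryAdd team (x - 1, y) (rest, s, n)).2.1 +
      (tryAdd team (x - 1, y) (rest, s, n)).1.length ≤ 2 * U team s + rest.length := hu1
  refine ⟨hI4, ?_, ?_, ?_, ?_, by omega⟩
  · intro e he; exact hm4 _ (hm3 _ (hm2 _ (hm1 _ he)))
  · intro e he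
    rcases hc4 e he with he3 | hq4
    · rcases hc3 e he3 with he2 | hq3
      · rcases hc2 e he2 with he1 | hq2
        · rcases hc1 e he1 with he0 | hq1
          · exact Or.inl he0
          · exact Or.inr (hqm4 _ (hqm3 _ (hqm2 _ hq1)))
        · exact Or.inr (hqm4 _ (hqm3 _ hq2))
      · exact Or.inr (hqm4 _ hq3)
    · exact Or.inr hq4
  · intro e he; exact hqm4 _ (hqm3 _ (hqm2 _ (hqm1 _ he)))
  · intro d hadj hd
    rcases hadj with rfl | rfl | rfl | rfl
    · exact hm4 _ (hm3 _ (hm2 _ (hin1 hd)))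
    · exact hm4 _ (hm3 _ (hin2 hd))
    · exact hm4 _ (hin3 hd)
    · exact hin4 hd

theorem bfsLoop_spec (team : List (Int × Int)) (t0 : Int × Int) :
    ∀ (fuel : Nat) (q : List (Int × Int)) (s : PySem.Set (Int × Int)) (n : Int),
      InvT team t0 q s n →
      (∀ e ∈ s, e ∉ q → ∀ d, Adj e d → d ∈ team → d ∈ s) →
      2 * U team s + q.length ≤ fuel →
      ∃ S : PySem.Set (Int × Int),
        bfsLoop team fuel q s n = (S, (S.length : Int)) ∧ S.Nodup ∧
        (∀ c, c ∈ S ↔ Reach team t0 c) := by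
  intro fuel
  induction fuel with
  | zero =>
    intro q s n hInv hcl hfuel
    obtain ⟨hq, hnd, ht0, hr, hn⟩ := hInv
    have hqnil : q = [] := by
      cases q with
      | nil => rfl
      | cons a t => simp at hfuel
    subst hqnil
    refine ⟨s, by simp [bfsLoop, hn], hnd, fun c => ⟨hr c, ?_⟩⟩
    exact fun h => reach_subset_of_closed ht0 (fun e he => hcl e he (by simp)) c h
  | succ fuel ih =>
    intro q s n hInv hcl hfuel
    cases q with
    | nil =>
      obtain ⟨hq, hnd, ht0, hr, hn⟩ := hInv
      refine ⟨s, by simp [bfsLoop, hn], hnd, fun c => ⟨hr c, ?_⟩⟩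
      exact fun h => reach_subset_of_closed ht0 (fun e he => hcl e he (by simp)) c h
    | cons hd rest =>
      obtain ⟨x, y⟩ := hd
      have hxy : Reach team t0 (x, y) := hInv.2.2.2.1 _ (hInv.1 _ (by simp))
      have hInv' : InvT team t0 rest s n :=
        ⟨fun c hc => hInv.1 c (by simp [hc]), hInv.2.1, hInv.2.2.1, hInv.2.2.2.1, hInv.2.2.2.2⟩
      obtain ⟨hI, hm, hc, hqm, hnb, hu⟩ := bfsInner_spec team t0 x y rest s n hInv' hxy
      have hloop : bfsLoop team (fuel + 1) ((x, y) :: rest) s n =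
          bfsLoop team fuel (bfsInner team x y (rest, s, n)).1
            (bfsInner team x y (rest, s, n)).2.1 (bfsInner team x y (rest, s, n)).2.2 := rfl
      rw [hloop]
      apply ih _ _ _ hI
      · intro e he hq' d hadj hd
        by_cases hes : e ∈ s
        · by_cases hexy : e = (x, y)
          · subst hexy; exact hnb d hadj hd
          · have hrest : e ∉ rest := fun h => hq' (hqm e h)
            have : e ∉ (x, y) :: rest := by simp [hexy, hrest]
            exact hm _ (hcl e hes this d hadj hd)
        · rcases hc e he with he' | he'
          · exact absurd he' hes
          · exact absurd he' hq'
      · simp only [List.length_cons] at hfuel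
        omega

-- ---------- B side ----------

def satStep (comp : PySem.Set (Int × Int)) (c : Int × Int) : PySem.Set (Int × Int) :=
  if c ∉ comp ∧ ((c.1 - 1, c.2) ∈ comp ∨ (c.1 + 1, c.2) ∈ comp ∨
                 (c.1, c.2 - 1) ∈ comp ∨ (c.1, c.2 + 1) ∈ comp)
  then PySem.Set.add comp c else comp

theorem satPass_eq (cells : List (Int × Int)) (comp : PySem.Set (Int × Int)) :
    satPass cells comp = cells.foldl satStep comp := rfl

theorem satStep_append (comp : PySem.Set (Int × Int)) (c : Int × Int) :
    ∃ ext, satStep comp c = comp ++ ext := by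
  unfold satStep
  split_ifs with h
  · exact ⟨[c], PySem.Set.add_of_not_mem h.1⟩
  · exact ⟨[], by simp⟩

theorem foldl_satStep_append (cells : List (Int × Int)) :
    ∀ comp : PySem.Set (Int × Int), ∃ ext, cells.foldl satStep comp = comp ++ ext := by
  induction cells with
  | nil => exact fun comp => ⟨[], by simp⟩
  | cons a t ih =>
    intro comp
    obtain ⟨e1, he1⟩ := satStep_append comp a
    obtain ⟨e2, he2⟩ := ih (satStep comp a)
    exact ⟨e1 ++ e2, by rw [List.foldl_cons, he2, he1, List.append_assoc]⟩

theorem mem_foldl_satStep (cells : List (Int × Int)) (comp : PySem.Set (Int × Int))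
    {e : Int × Int} (he : e ∈ comp) : e ∈ cells.foldl satStep comp := by
  obtain ⟨ext, hext⟩ := foldl_satStep_append cells comp
  rw [hext]; exact List.mem_append.mpr (Or.inl he)

theorem mem_satStep_cases {comp : PySem.Set (Int × Int)} {c e : Int × Int}
    (he : e ∈ satStep comp c) : e ∈ comp ∨ e = c := by
  unfold satStep at he
  split_ifs at he with h
  · exact (PySem.Set.mem_add _ _ _).mp he
  · exact Or.inl he

theorem foldl_satStep_sound (team : List (Int × Int)) (t0 : Int × Int) :
    ∀ (cells : List (Int × Int)) (comp : PySem.Set (Int × Int)),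
      (∀ c ∈ cells, c ∈ team) → comp.Nodup → (∀ e ∈ comp, Reach team t0 e) →
      (cells.foldl satStep comp).Nodup ∧ ∀ e ∈ cells.foldl satStep comp, Reach team t0 e := by
  intro cells
  induction cells with
  | nil => exact fun comp _ hnd hr => ⟨hnd, hr⟩
  | cons a t ih =>
    intro comp hcells hnd hr
    have hstep : (satStep comp a).Nodup ∧ ∀ e ∈ satStep comp a, Reach team t0 e := by
      unfold satStep
      split_ifs with h
      · refine ⟨PySem.Set.nodup_add _ _ hnd, ?_⟩
        intro e he
        rcases (PySem.Set.mem_add _ _ _).mp he with he | rfl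
        · exact hr e he
        · obtain ⟨hna, hnbr⟩ := h
          have ha : e ∈ team := hcells e (by simp)
          rcases hnbr with hp | hp | hp | hp
          · exact Reach.step (hr _ hp) (adj_symm (Or.inl rfl)) ha
          · exact Reach.step (hr _ hp) (adj_symm (Or.inr (Or.inl rfl))) ha
          · exact Reach.step (hr _ hp) (adj_symm (Or.inr (Or.inr (Or.inl rfl)))) ha
          · exact Reach.step (hr _ hp) (adj_symm (Or.inr (Or.inr (Or.inr rfl)))) ha
      · exact ⟨hnd, hr⟩
    exact ih (satStep comp a) (fun c hc => hcells c (by simp [hc])) hstep.1 hstep.2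

theorem foldl_satStep_mem_cases (cells : List (Int × Int)) :
    ∀ (comp : PySem.Set (Int × Int)) (e : Int × Int),
      e ∈ cells.foldl satStep comp → e ∈ comp ∨ e ∈ cells := by
  induction cells with
  | nil => exact fun comp e he => Or.inl he
  | cons a t ih =>
    intro comp e he
    rcases ih (satStep comp a) e he with he' | he'
    · rcases mem_satStep_cases he' with he'' | rfl
      · exact Or.inl he''
      · exact Or.inr (by simp)
    · exact Or.inr (by simp [he'])

theorem satPass_complete (cells : List (Int × Int)) :
    ∀ (comp : PySem.Set (Int × Int)) (c : Int × Int), c ∈ cells →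
      ((c.1 - 1, c.2) ∈ comp ∨ (c.1 + 1, c.2) ∈ comp ∨
       (c.1, c.2 - 1) ∈ comp ∨ (c.1, c.2 + 1) ∈ comp) →
      c ∈ satPass cells comp := by
  induction cells with
  | nil => intro comp c hc _; cases hc
  | cons a t ih =>
    intro comp c hc h
    rw [satPass_eq, List.foldl_cons]
    have hmono : ∀ e ∈ comp, e ∈ satStep comp a := by
      intro e he
      obtain ⟨ext, hext⟩ := satStep_append comp a
      rw [hext]; exact List.mem_append.mpr (Or.inl he)
    rcases List.mem_cons.mp hc with rfl | hct
    · have hcin : c ∈ satStep comp c := by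
        by_cases hcc : c ∈ comp
        · exact hmono _ hcc
        · unfold satStep
          rw [if_pos ⟨hcc, h⟩]
          exact (PySem.Set.mem_add _ _ _).mpr (Or.inr rfl)
      exact mem_foldl_satStep t _ hcin
    · have h' : (c.1 - 1, c.2) ∈ satStep comp a ∨ (c.1 + 1, c.2) ∈ satStep comp a ∨
          (c.1, c.2 - 1) ∈ satStep comp a ∨ (c.1, c.2 + 1) ∈ satStep comp a := by
        rcases h with hh | hh | hh | hh
        · exact Or.inl (hmono _ hh)
        · exact Or.inr (Or.inl (hmono _ hh))
        · exact Or.inr (Or.inr (Or.inl (hmono _ hh)))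
        · exact Or.inr (Or.inr (Or.inr (hmono _ hh)))
      exact ih (satStep comp a) c hct h'

-- k saturation passes (what bfs_alt's outer 'for _ in range(...)' computes)
def iterSat (cells : List (Int × Int)) (comp0 : PySem.Set (Int × Int)) (k : Nat) :
    PySem.Set (Int × Int) :=
  (List.range k).foldl (fun comp _ => satPass cells comp) comp0

theorem iterSat_succ (cells : List (Int × Int)) (comp0 : PySem.Set (Int × Int)) (k : Nat) :
    iterSat cells comp0 (k + 1) = satPass cells (iterSat cells comp0 k) := by
  unfold iterSat
  rw [List.range_succ, List.foldl_append]
  rfl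

theorem iterSat_fix (cells : List (Int × Int)) (comp0 : PySem.Set (Int × Int)) {k : Nat}
    (hfix : satPass cells (iterSat cells comp0 k) = iterSat cells comp0 k) :
    ∀ j, k ≤ j → iterSat cells comp0 j = iterSat cells comp0 k := by
  intro j hj
  induction j with
  | zero => rw [Nat.le_zero.mp hj]
  | succ j ih =>
    rcases Nat.lt_or_ge k (j + 1) with hlt | hge
    · have hkj : k ≤ j := by omega
      rw [iterSat_succ, ih hkj, hfix]
    · rw [Nat.le_antisymm hj hge]

theorem bfs_alt_core (team : List (Int × Int)) (t0 : Int × Int) (rest : List (Int × Int))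
    (hteam : team = t0 :: rest) :
    ∃ S : PySem.Set (Int × Int),
      iterSat (PySem.Set.ofList team) (PySem.Set.ofList [t0]) (PySem.Set.ofList team).length = S ∧
      S.Nodup ∧ (∀ c, c ∈ S ↔ Reach team t0 c) := by
  classical
  set cells := PySem.Set.ofList team with hcells
  have ht0team : t0 ∈ team := by rw [hteam]; simp
  have hc0 : PySem.Set.ofList [t0] = [t0] := rfl
  have hcellsteam : ∀ c ∈ cells, c ∈ team := fun c hc => (PySem.Set.mem_ofList _ _).mp hc
  have hcellsnd : cells.Nodup := PySem.Set.nodup_ofList team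
  -- invariants of the iteration
  have hinv : ∀ k, (iterSat cells [t0] k).Nodup ∧ (∀ e ∈ iterSat cells [t0] k, Reach team t0 e) ∧
      t0 ∈ iterSat cells [t0] k ∧ (∀ e ∈ iterSat cells [t0] k, e ∈ cells) := by
    intro k
    induction k with
    | zero =>
      refine ⟨by simp [iterSat], ?_, by simp [iterSat], ?_⟩
      · intro e he
        simp only [iterSat, List.range_zero, List.foldl_nil, List.mem_singleton] at he
        subst he; exact Reach.refl
      · intro e he
        simp only [iterSat, List.range_zero, List.foldl_nil, List.mem_singleton] at he
        subst he; exact (PySem.Set.mem_ofList _ _).mpr ht0team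
    | succ k ih =>
      obtain ⟨hnd, hr, ht0m, hsub⟩ := ih
      rw [iterSat_succ]
      obtain ⟨hnd', hr'⟩ := foldl_satStep_sound team t0 cells _ hcellsteam hnd hr
      rw [← satPass_eq] at hnd' hr'
      refine ⟨hnd', hr', mem_foldl_satStep _ _ ht0m, ?_⟩
      intro e he
      rcases foldl_satStep_mem_cases cells _ e he with he' | he'
      · exact hsub e he'
      · exact he'
  -- a fixpoint is reached within cells.length passes
  have hfix : ∃ k ≤ cells.length, satPass cells (iterSat cells [t0] k) = iterSat cells [t0] k := by
    by_contra hno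
    push_neg at hno
    have hgrow : ∀ k, k ≤ cells.length → k + 1 ≤ (iterSat cells [t0] k).length := by
      intro k
      induction k with
      | zero => intro _; simp [iterSat]
      | succ k ih =>
        intro hk
        have hk' : k ≤ cells.length := by omega
        have hne := hno k hk'
        obtain ⟨ext, hext⟩ := foldl_satStep_append cells (iterSat cells [t0] k)
        rw [← satPass_eq] at hext
        have hextne : ext ≠ [] := by
          intro h; rw [h, List.append_nil] at hext; exact hne hext
        have : 1 ≤ ext.length := by
          cases ext with
          | nil => exact absurd rfl hextne
          | cons _ _ => simp
        rw [iterSat_succ, hext]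
        simp only [List.length_append]
        have := ih hk'
        omega
    have h1 := hgrow cells.length (le_refl _)
    have h2 : (iterSat cells [t0] cells.length).length ≤ cells.length := by
      obtain ⟨hnd, _, _, hsub⟩ := hinv cells.length
      exact List.Subperm.length_le (List.subperm_of_subset hnd hsub)
    omega
  obtain ⟨k, hk, hfixk⟩ := hfix
  have hstable := iterSat_fix cells [t0] hfixk cells.length hk
  refine ⟨iterSat cells [t0] cells.length, rfl, (hinv cells.length).1, ?_⟩
  obtain ⟨hnd, hr, ht0m, hsub⟩ := hinv cells.length
  intro c
  constructor
  · exact hr c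
  · intro hreach
    apply reach_subset_of_closed ht0m _ c hreach
    intro e he d hadj hd
    have hdcells : d ∈ cells := (PySem.Set.mem_ofList _ _).mpr hd
    have hnbr : (d.1 - 1, d.2) ∈ iterSat cells [t0] cells.length ∨
        (d.1 + 1, d.2) ∈ iterSat cells [t0] cells.length ∨
        (d.1, d.2 - 1) ∈ iterSat cells [t0] cells.length ∨
        (d.1, d.2 + 1) ∈ iterSat cells [t0] cells.length := by
      have hadj' := adj_symm hadj
      rcases hadj' with h | h | h | h
      · exact Or.inl (h ▸ he)
      · exact Or.inr (Or.inl (h ▸ he))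
      · exact Or.inr (Or.inr (Or.inl (h ▸ he)))
      · exact Or.inr (Or.inr (Or.inr (h ▸ he)))
    have := satPass_complete cells (iterSat cells [t0] cells.length) d hdcells hnbr
    rw [hstable, hfixk] at this
    rw [hstable]
    exact this

-- ===== VERDICT (by name: the statement is the Claim_ definition above) =====
theorem bfs_spec : Claim_equal_bfs := by
  intro team hdom hpre
  unfold Spec_bfs
  cases team with
  | nil => exact absurd rfl hpre
  | cons t0 rest =>
    -- A side
    have hInv0 : InvT (t0 :: rest) t0 [t0] (PySem.Set.ofList [t0]) 1 := by
      refine ⟨fun c hc => hc, ?_, ?_, ?_, ?_⟩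
      · simp [PySem.Set.ofList, PySem.Set.add, PySem.Set.empty]
      · simp [PySem.Set.ofList, PySem.Set.add, PySem.Set.empty]
      · intro c hc
        have : c = t0 := by
          simpa [PySem.Set.ofList, PySem.Set.add, PySem.Set.empty] using hc
        subst this; exact Reach.refl
      · simp [PySem.Set.ofList, PySem.Set.add, PySem.Set.empty]
    have hcl0 : ∀ e ∈ PySem.Set.ofList [t0], e ∉ [t0] → ∀ d, Adj e d → d ∈ t0 :: rest →
        d ∈ PySem.Set.ofList [t0] := by
      intro e he hq d _ _
      exact absurd (by simpa [PySem.Set.ofList, PySem.Set.add, PySem.Set.empty] using he)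
        (by simpa using hq)
    have hfuel : 2 * U (t0 :: rest) (PySem.Set.ofList [t0]) + ([t0] : List (Int × Int)).length ≤
        2 * (t0 :: rest).length + 1 := by
      have := U_le (t0 :: rest) (PySem.Set.ofList [t0])
      simp only [List.length_singleton]
      omega
    obtain ⟨SA, hSA, hndA, hmemA⟩ :=
      bfsLoop_spec (t0 :: rest) t0 (2 * (t0 :: rest).length + 1) [t0]
        (PySem.Set.ofList [t0]) 1 hInv0 hcl0 hfuel
    -- B side
    obtain ⟨SB, hSB, hndB, hmemB⟩ := bfs_alt_core (t0 :: rest) t0 rest rfl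
    -- the two visited sets have the same members, hence (being nodup) the same size
    have hperm : SA.Perm SB :=
      (List.perm_ext_iff_of_nodup hndA hndB).mpr fun a => (hmemA a).trans (hmemB a).symm
    have hlen : SA.length = SB.length := hperm.length_eq
    show bfs (t0 :: rest) = bfs_alt (t0 :: rest)
    unfold bfs bfs_alt
    simp only
    rw [hSA]
    rw [iterSat] at hSB
    rw [hSB]
    simp only [hlen]
    simp only [decide_eq_decide]
    exact ⟨fun h => by exact_mod_cast h, fun h => by exact_mod_cast h⟩
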